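-- pv_equiv track=rewrite | github.com/darshitshah-kitaboo/k12-adoption-sheet-sync | scripts/promote_scraped.py | find_scraped_cycle
-- ===== SOURCE A (Python) =====
-- def find_scraped_cycle(snap_cycles, adoption_cycle):
--     """Match an adoption_data cycle to a scraped cycle by subject.
--
--     Exact case-insensitive subject match first, then loose substring
--     match in either direction. Returns None when nothing matches or
--     the adoption cycle has no subject.
--     """
--     adoption_subject = (adoption_cycle.get("su") or "").strip().lower()
--     if not adoption_subject:
--         return None
--     for sc in snap_cycles or []:
--         scraped_subject = (sc.get("subject") or "").strip().lower()
--         if scraped_subject and scraped_subject == adoption_subject: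
--             return sc
--     for sc in snap_cycles or []:
--         scraped_subject = (sc.get("subject") or "").strip().lower()
--         if not scraped_subject:
--             continue
--         if (adoption_subject in scraped_subject
--                 or scraped_subject in adoption_subject):
--             return sc
--     return None
-- ===== SOURCE B (Python) =====
-- def find_scraped_cycle(snap_cycles, adoption_cycle):
--     """One pass: return the first exact (normalized) subject match immediately;
--     remember the first loose substring match as a fallback and return it at the end."""
--     adoption_subject = (adoption_cycle.get("su") or "").strip().lower()
--     if not adoption_subject:
--         return None
--     fallback = None
--     for sc in snap_cycles or []:
--         scraped_subject = (sc.get("subject") or "").strip().lower()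
--         if not scraped_subject:
--             continue
--         if scraped_subject == adoption_subject:
--             return sc
--         if fallback is None and (adoption_subject in scraped_subject
--                                  or scraped_subject in adoption_subject):
--             fallback = sc
--     return fallback
-- ===== Notes on version B (the rewrite author's own statement) =====
-- stated objective: alternative
-- what changed: Replaces A's two full scans (exact-match pass, then substring pass) with a single pass that returns on the first exact match and carries the first loose match in a fallback variable; Pre_ only excludes association lists where the key 'su'/'subject' repeats, which represent no Python dict.
import Mathlib
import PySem

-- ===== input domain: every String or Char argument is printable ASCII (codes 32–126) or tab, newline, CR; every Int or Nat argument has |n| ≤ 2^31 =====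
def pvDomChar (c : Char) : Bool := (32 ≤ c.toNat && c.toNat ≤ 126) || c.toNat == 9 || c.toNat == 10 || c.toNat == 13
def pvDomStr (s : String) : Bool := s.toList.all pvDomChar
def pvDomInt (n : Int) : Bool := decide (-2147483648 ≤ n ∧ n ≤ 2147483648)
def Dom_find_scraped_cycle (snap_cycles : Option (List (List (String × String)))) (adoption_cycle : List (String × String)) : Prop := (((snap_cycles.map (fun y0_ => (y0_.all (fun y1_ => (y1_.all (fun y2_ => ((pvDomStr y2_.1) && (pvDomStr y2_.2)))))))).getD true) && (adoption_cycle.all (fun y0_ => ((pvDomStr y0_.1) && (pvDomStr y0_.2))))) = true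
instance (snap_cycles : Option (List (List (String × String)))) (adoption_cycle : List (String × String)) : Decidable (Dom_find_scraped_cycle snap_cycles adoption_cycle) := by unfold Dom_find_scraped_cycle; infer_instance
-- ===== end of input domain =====

-- B replaces A's two full scans with a single pass carrying a fallback for the first loose match (alternative decomposition, same cost).
-- ===== PORT A =====
-- A: normalize the adoption subject; first loop = exact-match scan, second loop = loose substring scan.
def find_scraped_cycle (snap_cycles : Option (List (List (String × String)))) (adoption_cycle : List (String × String)) : Option (List (String × String)) :=
  let adoption_subject := PySem.Str.lower (PySem.Str.strip (PySem.Dict.getD (PySem.Dict.mk adoption_cycle) "su" ""))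
  if adoption_subject = "" then none
  else
    match (snap_cycles.getD []).find? (fun sc =>
        let scraped_subject := PySem.Str.lower (PySem.Str.strip (PySem.Dict.getD (PySem.Dict.mk sc) "subject" ""))
        !(scraped_subject == "") && scraped_subject == adoption_subject) with
    | some sc => some sc
    | none =>
      (snap_cycles.getD []).find? (fun sc =>
        let scraped_subject := PySem.Str.lower (PySem.Str.strip (PySem.Dict.getD (PySem.Dict.mk sc) "subject" ""))
        !(scraped_subject == "") &&
          (PySem.Str.isIn adoption_subject scraped_subject || PySem.Str.isIn scraped_subject adoption_subject))

-- ===== PORT B =====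
-- B: one recursive pass; exact match returns at once, first loose match is stored in `fallback`.
def fsAltLoop (adoption_subject : String) (fallback : Option (List (String × String))) :
    List (List (String × String)) → Option (List (String × String))
  | [] => fallback
  | sc :: rest =>
    let scraped_subject := PySem.Str.lower (PySem.Str.strip (PySem.Dict.getD (PySem.Dict.mk sc) "subject" ""))
    if scraped_subject = "" then fsAltLoop adoption_subject fallback rest
    else if scraped_subject = adoption_subject then some sc
    else if fallback = none ∧
        (PySem.Str.isIn adoption_subject scraped_subject || PySem.Str.isIn scraped_subject adoption_subject) then
      fsAltLoop adoption_subject (some sc) rest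
    else fsAltLoop adoption_subject fallback rest

def find_scraped_cycle_alt (snap_cycles : Option (List (List (String × String)))) (adoption_cycle : List (String × String)) : Option (List (String × String)) :=
  let adoption_subject := PySem.Str.lower (PySem.Str.strip (PySem.Dict.getD (PySem.Dict.mk adoption_cycle) "su" ""))
  if adoption_subject = "" then none
  else fsAltLoop adoption_subject none (snap_cycles.getD [])

-- ===== PRECONDITION & SPEC =====
-- Pre_ excludes association lists in which a looked-up key ("su" in adoption_cycle, "subject" in a snap cycle) occurs more than
-- once: such lists represent no Python dict, so first-match lookup there is an artefact of the encoding, not of A.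
def Pre_find_scraped_cycle (snap_cycles : Option (List (List (String × String)))) (adoption_cycle : List (String × String)) : Prop :=
  (adoption_cycle.map Prod.fst).count "su" ≤ 1 ∧
    ∀ sc ∈ snap_cycles.getD [], (sc.map Prod.fst).count "subject" ≤ 1
instance (snap_cycles : Option (List (List (String × String)))) (adoption_cycle : List (String × String)) : Decidable (Pre_find_scraped_cycle snap_cycles adoption_cycle) := by unfold Pre_find_scraped_cycle; infer_instance
def pvWitness_find_scraped_cycle : (Option (List (List (String × String)))) × (List (String × String)) :=
  (some [[("subject", "Math")], [("subject", "science")]], [("su", " SCIENCE ")])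

def Spec_find_scraped_cycle (snap_cycles : Option (List (List (String × String)))) (adoption_cycle : List (String × String)) (out : Option (List (String × String))) : Prop := out = find_scraped_cycle_alt snap_cycles adoption_cycle
instance (snap_cycles : Option (List (List (String × String)))) (adoption_cycle : List (String × String)) (out : Option (List (String × String))) : Decidable (Spec_find_scraped_cycle snap_cycles adoption_cycle out) := by unfold Spec_find_scraped_cycle; infer_instance

-- ===== CLAIM (what is proved, stated in full; the proofs are below) =====
def Claim_equal_find_scraped_cycle : Prop := ∀ (snap_cycles : Option (List (List (String × String)))) (adoption_cycle : List (String × String)), Dom_find_scraped_cycle snap_cycles adoption_cycle → Pre_find_scraped_cycle snap_cycles adoption_cycle → Spec_find_scraped_cycle snap_cycles adoption_cycle (find_scraped_cycle snap_cycles adoption_cycle)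

-- ===== LEMMAS AND PROOFS =====

-- ===== VERDICT (by name: the statement is the Claim_ definition above) =====
-- Invariant of B's single pass: it equals "exact scan, else fallback, else loose scan".
theorem fsAltLoop_eq (a : String) (fb : Option (List (String × String)))
    (l : List (List (String × String))) :
    fsAltLoop a fb l =
      match l.find? (fun sc =>
          let ss := PySem.Str.lower (PySem.Str.strip (PySem.Dict.getD (PySem.Dict.mk sc) "subject" ""))
          !(ss == "") && ss == a) with
      | some sc => some sc
      | none =>
        match fb with
        | some x => some x
        | none => l.find? (fun sc =>
            let ss := PySem.Str.lower (PySem.Str.strip (PySem.Dict.getD (PySem.Dict.mk sc) "subject" ""))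
            !(ss == "") && (PySem.Str.isIn a ss || PySem.Str.isIn ss a)) := by
  induction l generalizing fb with
  | nil => cases fb <;> simp [fsAltLoop]
  | cons sc rest ih =>
    simp only [fsAltLoop, List.find?]
    by_cases h1 : PySem.Str.lower (PySem.Str.strip ((PySem.Dict.mk sc).getD "subject" "")) = ""
    · simp [h1, ih]
    · have hb1 : (PySem.Str.lower (PySem.Str.strip ((PySem.Dict.mk sc).getD "subject" "")) == "") = false :=
        beq_eq_false_iff_ne.mpr h1
      by_cases h2 : PySem.Str.lower (PySem.Str.strip ((PySem.Dict.mk sc).getD "subject" "")) = a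
      · have ha : a ≠ "" := h2 ▸ h1
        have hba : (a == "") = false := beq_eq_false_iff_ne.mpr ha
        simp [h2, ha, hba]
      · have hb2 : (PySem.Str.lower (PySem.Str.strip ((PySem.Dict.mk sc).getD "subject" "")) == a) = false :=
          beq_eq_false_iff_ne.mpr h2
        by_cases h3 : (PySem.Chars.isIn a.toList
                (PySem.Chars.lower (PySem.Chars.strip ((PySem.Dict.mk sc).getD "subject" "").toList)) ||
              PySem.Chars.isIn (PySem.Chars.lower (PySem.Chars.strip ((PySem.Dict.mk sc).getD "subject" "").toList))
                a.toList) = true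
        · cases fb <;> simp [h1, h2, hb1, hb2, h3, ih]
        · cases fb <;> simp [h1, h2, hb1, hb2, h3, ih]

theorem find_scraped_cycle_spec : Claim_equal_find_scraped_cycle := by
  intro snap_cycles adoption_cycle _ _
  unfold Spec_find_scraped_cycle find_scraped_cycle find_scraped_cycle_alt
  by_cases h : PySem.Str.lower (PySem.Str.strip (PySem.Dict.getD (PySem.Dict.mk adoption_cycle) "su" "")) = ""
  · simp [h]
  · simp only [h, if_false]
    rw [fsAltLoop_eq]
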